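-- pv_equiv track=rewrite | github.com/zhengshifa/mystock | StockData/src/scheduler/cron_scheduler.py | _matches_field
-- ===== SOURCE A (Python) =====
-- def _matches_field(field_value: str, actual_value: int,
--                   min_val: int, max_val: int) -> bool:
--     """检查字段是否匹配"""
--     if field_value == "*":
--         return True
--
--     for part in field_value.split(','):
--         part = part.strip()
--
--         if '-' in part and '/' not in part:
--             # 范围匹配
--             start, end = map(int, part.split('-'))
--             if start <= actual_value <= end:
--                 return True
--
--         elif '/' in part:
--             # 步长匹配
--             base, step = part.split('/')
--             step = int(step)
--
--             if base == "*":
--                 if actual_value % step == 0: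
--                     return True
--             elif '-' in base:
--                 start, end = map(int, base.split('-'))
--                 if start <= actual_value <= end and (actual_value - start) % step == 0:
--                     return True
--             else:
--                 base_val = int(base)
--                 if actual_value >= base_val and (actual_value - base_val) % step == 0:
--                     return True
--
--         else:
--             # 精确匹配
--             if int(part) == actual_value:
--                 return True
--
--     return False
-- ===== SOURCE B (Python) =====
-- def _matches_field(field_value: str, actual_value: int,
--                    min_val: int, max_val: int) -> bool:
--     """Lex each part into a token stream (number runs and '-', '/', '*' symbols),
--     then match the whole token shape at once instead of substring dispatch."""
--     if field_value == "*":
--         return True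
--     return any(_match_tokens(_tokenize(part.strip()), actual_value)
--                for part in field_value.split(','))
--
--
-- def _tokenize(part):
--     """One char-level pass: number runs are kept verbatim, symbols stand alone."""
--     tokens, run = [], ''
--     for ch in part:
--         if ch in '-/*':
--             if run:
--                 tokens.append(run)
--                 run = ''
--             tokens.append(ch)
--         else:
--             run += ch
--     if run:
--         tokens.append(run)
--     return tokens
--
--
-- def _match_tokens(tokens, value):
--     if len(tokens) == 1:
--         return int(tokens[0]) == value
--     if len(tokens) == 3 and tokens[1] == '-':
--         return int(tokens[0]) <= value <= int(tokens[2])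
--     if len(tokens) == 3 and tokens[0] == '*' and tokens[1] == '/':
--         return value % int(tokens[2]) == 0
--     if len(tokens) == 3 and tokens[1] == '/':
--         lo = int(tokens[0])
--         return value >= lo and (value - lo) % int(tokens[2]) == 0
--     if len(tokens) == 5 and tokens[1] == '-' and tokens[3] == '/':
--         lo = int(tokens[0])
--         return lo <= value <= int(tokens[2]) and (value - lo) % int(tokens[4]) == 0
--     raise ValueError("invalid cron field part: %r" % (tokens,))
-- ===== Notes on version B (the rewrite author's own statement) =====
-- stated objective: alternative
-- what changed: B replaces A's substring tests and nested split('-')/split('/') dispatch by a character-level lexer that turns each part into a token stream (number runs and '-'/'/'/'*' symbols) and one shape-match over the whole token list.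
-- outside the precondition, e.g. on _matches_field('5,*', 5, 0, 59): A returns True, B returns True; on _matches_field('5-6/0', 0, 0, 59): A returns False, B returns False; on _matches_field('*/-1', 3, 0, 59): A returns True, B raises ValueError
import Mathlib
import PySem

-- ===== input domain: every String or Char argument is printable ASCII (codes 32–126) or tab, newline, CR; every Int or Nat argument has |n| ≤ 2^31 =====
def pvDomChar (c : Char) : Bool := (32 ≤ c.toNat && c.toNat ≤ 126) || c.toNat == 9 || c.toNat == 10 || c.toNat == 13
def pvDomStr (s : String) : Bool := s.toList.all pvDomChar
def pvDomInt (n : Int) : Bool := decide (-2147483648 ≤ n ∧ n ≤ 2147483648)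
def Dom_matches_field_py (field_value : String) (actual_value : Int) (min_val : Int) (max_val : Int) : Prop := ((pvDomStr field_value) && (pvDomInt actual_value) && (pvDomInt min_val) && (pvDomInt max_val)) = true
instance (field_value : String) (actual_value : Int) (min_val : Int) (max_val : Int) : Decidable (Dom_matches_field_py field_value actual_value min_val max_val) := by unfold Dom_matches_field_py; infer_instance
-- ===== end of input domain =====

-- B lexes each part into a token stream (number runs and '-'/'/'/'*' symbols) and matches the whole token
-- shape at once, instead of A's substring tests and nested split dispatch; same values, no speed claim.

-- ===== PORT A =====
-- one iteration of A's loop body, on the already-stripped part (false where Python raises; Pre_ excludes those)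
def pvA_part (p : List Char) (a : Int) : Bool :=
  if PySem.Chars.isIn ['-'] p && !(PySem.Chars.isIn ['/'] p) then
    -- 范围匹配: start, end = map(int, part.split('-'))
    match PySem.Chars.splitOn p ['-'] with
    | [s, e] =>
      match PySem.Int.ofChars? s, PySem.Int.ofChars? e with
      | some start, some stop => decide (start ≤ a ∧ a ≤ stop)
      | _, _ => false
    | _ => false
  else if PySem.Chars.isIn ['/'] p then
    -- 步长匹配: base, step = part.split('/')
    match PySem.Chars.splitOn p ['/'] with
    | [base, stepcs] =>
      match PySem.Int.ofChars? stepcs with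
      | some step =>
        if base = ['*'] then decide (PySem.Int.mod a step = 0)
        else if PySem.Chars.isIn ['-'] base then
          match PySem.Chars.splitOn base ['-'] with
          | [s, e] =>
            match PySem.Int.ofChars? s, PySem.Int.ofChars? e with
            | some start, some stop =>
                decide (start ≤ a ∧ a ≤ stop ∧ PySem.Int.mod (a - start) step = 0)
            | _, _ => false
          | _ => false
        else
          match PySem.Int.ofChars? base with
          | some baseVal => decide (baseVal ≤ a ∧ PySem.Int.mod (a - baseVal) step = 0)
          | none => false
      | none => false
    | _ => false
  else
    -- 精确匹配
    match PySem.Int.ofChars? p with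
    | some n => decide (n = a)
    | none => false

def matches_field_py (field_value : String) (actual_value : Int) (min_val : Int) (max_val : Int) : Bool :=
  if field_value = "*" then true
  else
    (PySem.Chars.splitOn field_value.toList [',']).any
      (fun part => pvA_part (PySem.Chars.strip part) actual_value)

-- ===== PORT B =====
-- the three symbol characters of the scanner ("ch in '-/*'")
def pvDelim (c : Char) : Bool := c = '-' || c = '/' || c = '*'

-- _tokenize's loop: tokens list and current run, exactly as in Source B
def pvB_tokGo : List Char → List (List Char) → List Char → List (List Char)
  | [], toks, run => if run = [] then toks else toks ++ [run]
  | c :: cs, toks, run =>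
    if pvDelim c then
      pvB_tokGo cs ((if run = [] then toks else toks ++ [run]) ++ [[c]]) []
    else pvB_tokGo cs toks (run ++ [c])

def pvB_tokenize (p : List Char) : List (List Char) := pvB_tokGo p [] []

-- int(token) (none = ValueError; Pre_ excludes the raising inputs)
def pvB_num (t : List Char) : Option Int := PySem.Int.ofChars? t

-- _match_tokens: dispatch on the token shape, in Source B's order
-- (a `none` parse and the final catch-all are where Source B raises ValueError; false there, outside Pre_)
def pvB_matchTokens (toks : List (List Char)) (v : Int) : Bool :=
  match toks with
  | [a] =>
    match pvB_num a with
    | some n => decide (n = v)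
    | none => false
  | [a, b, c] =>
    if b = ['-'] then
      match pvB_num a, pvB_num c with
      | some lo, some hi => decide (lo ≤ v ∧ v ≤ hi)
      | _, _ => false
    else if a = ['*'] && b = ['/'] then
      match pvB_num c with
      | some k => decide (PySem.Int.mod v k = 0)
      | none => false
    else if b = ['/'] then
      match pvB_num a, pvB_num c with
      | some lo, some k => decide (lo ≤ v ∧ PySem.Int.mod (v - lo) k = 0)
      | _, _ => false
    else false
  | [a, b, c, d, e] =>
    if b = ['-'] && d = ['/'] then
      match pvB_num a, pvB_num c, pvB_num e with
      | some lo, some hi, some k => decide (lo ≤ v ∧ v ≤ hi ∧ PySem.Int.mod (v - lo) k = 0)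
      | _, _, _ => false
    else false
  | _ => false

def matches_field_py_alt (field_value : String) (actual_value : Int) (min_val : Int) (max_val : Int) : Bool :=
  if field_value = "*" then true
  else
    (PySem.Chars.splitOn field_value.toList [',']).any
      (fun part => pvB_matchTokens (pvB_tokenize (PySem.Chars.strip part)) actual_value)

-- ===== PRECONDITION & SPEC =====
-- a well-formed numeric piece: parses as an int and (redundantly, as any parsable piece does)
-- is nonempty and contains none of the symbol characters
def pvNumB (x : List Char) : Bool :=
  (PySem.Int.ofChars? x).isSome && !(decide (x = [])) &&
    !(decide ('*' ∈ x)) && !(decide ('-' ∈ x)) && !(decide ('/' ∈ x))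

-- step piece: parses to a positive int
def pvPosB (x : List Char) : Bool := decide (0 < (PySem.Int.ofChars? x).getD 0)

-- shape check for one stripped part (splits, memberships and int-parsability only)
def pvValidPart (p : List Char) : Bool :=
  if decide ('/' ∈ p) then
    match PySem.Chars.splitOn p ['/'] with
    | [base, st] =>
      pvNumB st && pvPosB st &&
        (if base = ['*'] then true
         else if decide ('-' ∈ base) then
           match PySem.Chars.splitOn base ['-'] with
           | [lo, hi] => pvNumB lo && pvNumB hi
           | _ => false
         else pvNumB base)
    | _ => false
  else if decide ('-' ∈ p) then
    match PySem.Chars.splitOn p ['-'] with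
    | [lo, hi] => pvNumB lo && pvNumB hi
    | _ => false
  else pvNumB p

-- Pre_ excludes inputs where some part is malformed or its step is not positive: on malformed or
-- zero-step parts A raises ValueError/ZeroDivisionError (except when an earlier matching part or a
-- short-circuited range test lets A return first — Pre_ is slightly narrower there, and B agrees with
-- A on those excluded returning inputs), and negative-step parts are a form no cron accepts, on which
-- A applies Python's floored mod while B's scanner reads the '-' as a separator.
def Pre_matches_field_py (field_value : String) (actual_value : Int) (min_val : Int) (max_val : Int) : Prop :=
  field_value = "*" ∨
    ∀ p ∈ PySem.Chars.splitOn field_value.toList [','], pvValidPart (PySem.Chars.strip p) = true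
instance (field_value : String) (actual_value : Int) (min_val : Int) (max_val : Int) : Decidable (Pre_matches_field_py field_value actual_value min_val max_val) := by unfold Pre_matches_field_py; infer_instance

def pvWitness_matches_field_py : String × Int × Int × Int := ("*/15, 3-5", 7, 0, 59)

def Spec_matches_field_py (field_value : String) (actual_value : Int) (min_val : Int) (max_val : Int) (out : Bool) : Prop := out = matches_field_py_alt field_value actual_value min_val max_val
instance (field_value : String) (actual_value : Int) (min_val : Int) (max_val : Int) (out : Bool) : Decidable (Spec_matches_field_py field_value actual_value min_val max_val out) := by unfold Spec_matches_field_py; infer_instance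

-- ===== CLAIM (what is proved, stated in full; the proofs are below) =====
def Claim_equal_matches_field_py : Prop := ∀ (field_value : String) (actual_value : Int) (min_val : Int) (max_val : Int), Dom_matches_field_py field_value actual_value min_val max_val → Pre_matches_field_py field_value actual_value min_val max_val → Spec_matches_field_py field_value actual_value min_val max_val (matches_field_py field_value actual_value min_val max_val)

-- ===== LEMMAS AND PROOFS =====

-- ---- a clean recursive view of single-separator splitOn ----
def pvSp1 (d : Char) : List Char → List (List Char)
  | [] => [[]]
  | c :: cs =>
    if c = d then [] :: pvSp1 d cs
    else
      match pvSp1 d cs with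
      | p :: ps => (c :: p) :: ps
      | [] => [[c]]

lemma pvSp1_ne_nil (d : Char) (s : List Char) : pvSp1 d s ≠ [] := by
  induction s with
  | nil => simp [pvSp1]
  | cons c cs ih =>
    simp only [pvSp1]
    split_ifs
    · simp
    · cases h : pvSp1 d cs with
      | nil => simp
      | cons p ps => simp

def pvHeadCons (pre : List Char) : List (List Char) → List (List Char)
  | p :: ps => (pre ++ p) :: ps
  | [] => [pre]

lemma pvSplitOn_go_eq (d : Char) (l : List Char) :
    ∀ (fuel : Nat) (cur : List Char) (acc : List (List Char)), l.length < fuel →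
      PySem.Chars.splitOn.go [d] fuel l cur acc = acc.reverse ++ pvHeadCons cur.reverse (pvSp1 d l) := by
  induction l with
  | nil =>
    intro fuel cur acc hf
    cases fuel with
    | zero => omega
    | succ f => simp [PySem.Chars.splitOn.go, pvSp1, pvHeadCons]
  | cons c cs ih =>
    intro fuel cur acc hf
    cases fuel with
    | zero => simp at hf
    | succ f =>
      rw [PySem.Chars.splitOn.go]
      by_cases hc : c = d
      · have hpre : List.isPrefixOf [d] (c :: cs) = true := by
          simp [List.isPrefixOf, hc]
        rw [if_pos hpre]
        have hdrop : List.drop ([d] : List Char).length (c :: cs) = cs := by simp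
        rw [hdrop, ih f [] (cur.reverse :: acc) (by simp at hf; omega)]
        cases h : pvSp1 d cs with
        | nil => exact absurd h (pvSp1_ne_nil d cs)
        | cons p ps => simp [pvSp1, hc, h, pvHeadCons]
      · have hpre : List.isPrefixOf [d] (c :: cs) = false := by
          simp [List.isPrefixOf]
          intro h; exact absurd h.symm hc
        rw [if_neg (by simp [hpre])]
        rw [ih f (c :: cur) acc (by simp at hf; omega)]
        have hsp : pvSp1 d (c :: cs) = match pvSp1 d cs with
          | p :: ps => (c :: p) :: ps
          | [] => [[c]] := by simp [pvSp1, hc]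
        cases h : pvSp1 d cs with
        | nil => exact absurd h (pvSp1_ne_nil d cs)
        | cons p ps => simp [hsp, h, pvHeadCons]

lemma pvSplitOn_eq_sp1 (d : Char) (s : List Char) :
    PySem.Chars.splitOn s [d] = pvSp1 d s := by
  unfold PySem.Chars.splitOn
  rw [pvSplitOn_go_eq d s (s.length + 1) [] [] (by omega)]
  cases h : pvSp1 d s with
  | nil => exact absurd h (pvSp1_ne_nil d s)
  | cons p ps => simp [pvHeadCons]

lemma pvSp1_one (d : Char) (s x : List Char) (h : pvSp1 d s = [x]) :
    s = x ∧ d ∉ x := by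
  induction s generalizing x with
  | nil =>
    simp only [pvSp1, List.cons.injEq, and_true] at h
    exact ⟨h, by simp [← h]⟩
  | cons c cs ih =>
    simp only [pvSp1] at h
    split_ifs at h with hc
    · simp at h
      exact absurd h.2 (pvSp1_ne_nil d cs)
    · cases hsp : pvSp1 d cs with
      | nil => exact absurd hsp (pvSp1_ne_nil d cs)
      | cons p ps =>
        rw [hsp] at h
        simp at h
        obtain ⟨hx, hps⟩ := h
        obtain ⟨hcs, hd⟩ := ih (x := p) (by rw [hsp, hps])
        subst hx hcs
        simp [hd]
        exact fun hdc => hc hdc.symm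

lemma pvSp1_two (d : Char) (s x y : List Char) (h : pvSp1 d s = [x, y]) :
    s = x ++ d :: y ∧ d ∉ x ∧ d ∉ y := by
  induction s generalizing x with
  | nil => simp [pvSp1] at h
  | cons c cs ih =>
    simp only [pvSp1] at h
    split_ifs at h with hc
    · simp at h
      obtain ⟨hx, hrest⟩ := h
      obtain ⟨hcs, hd⟩ := pvSp1_one d cs y hrest
      subst hx hcs hc
      simp [hd]
    · cases hsp : pvSp1 d cs with
      | nil => exact absurd hsp (pvSp1_ne_nil d cs)
      | cons p ps =>
        rw [hsp] at h
        simp at h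
        obtain ⟨hx, hps⟩ := h
        obtain ⟨hcs, hdx, hdy⟩ := ih (x := p) (by rw [hsp, hps])
        subst hx hcs
        refine ⟨by simp, ?_, hdy⟩
        simp [hdx]
        exact fun hdc => hc hdc.symm

-- ---- membership form of the single-char isIn test ----
lemma pvIsIn_singleton (d : Char) (s : List Char) :
    PySem.Chars.isIn [d] s = true ↔ d ∈ s := by
  rw [PySem.Chars.isIn_iff_infix]
  constructor
  · rintro ⟨t, u, h⟩; rw [← h]; simp
  · intro h
    obtain ⟨t, u, rfl⟩ := List.append_of_mem h
    exact ⟨t, u, by simp⟩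

lemma pvIsIn_singleton_false (d : Char) (s : List Char) (h : d ∉ s) :
    PySem.Chars.isIn [d] s = false := by
  cases hv : PySem.Chars.isIn [d] s with
  | false => rfl
  | true => exact absurd ((pvIsIn_singleton d s).mp hv) h

-- ---- basic facts about well-formed numeric pieces ----
lemma pvNum_facts (x : List Char) (h : pvNumB x = true) :
    (∃ n, PySem.Int.ofChars? x = some n) ∧ x ≠ [] ∧ '*' ∉ x ∧ '-' ∉ x ∧ '/' ∉ x := by
  simp only [pvNumB, Bool.and_eq_true, Bool.not_eq_true', decide_eq_false_iff_not] at h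
  obtain ⟨⟨⟨⟨h0, h1⟩, h2⟩, h3⟩, h4⟩ := h
  exact ⟨Option.isSome_iff_exists.mp h0, h1, h2, h3, h4⟩

lemma pvClean_of_num (x : List Char) (h : pvNumB x = true) :
    ∀ c ∈ x, pvDelim c = false := by
  intro c hc
  obtain ⟨-, -, hstar, hdash, hslash⟩ := pvNum_facts x h
  simp only [pvDelim, Bool.or_eq_false_iff, decide_eq_false_iff_not]
  refine ⟨⟨?_, ?_⟩, ?_⟩ <;> rintro rfl
  · exact hdash hc
  · exact hslash hc
  · exact hstar hc

-- ---- tokenizer on clean runs and symbols ----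
lemma pvTokGo_clean (s : List Char) (h : ∀ c ∈ s, pvDelim c = false) :
    ∀ (toks : List (List Char)) (run : List Char),
      pvB_tokGo s toks run = if run ++ s = [] then toks else toks ++ [run ++ s] := by
  induction s with
  | nil => intro toks run; simp [pvB_tokGo]
  | cons c cs ih =>
    intro toks run
    have hc : pvDelim c = false := h c (by simp)
    simp only [pvB_tokGo, hc, Bool.false_eq_true, if_false]
    rw [ih (fun c' hc' => h c' (by simp [hc'])) toks (run ++ [c])]
    simp

lemma pvTokGo_delim (x : List Char) (hx : ∀ c ∈ x, pvDelim c = false)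
    (d : Char) (hd : pvDelim d = true) (rest : List Char) :
    ∀ (toks : List (List Char)) (run : List Char),
      pvB_tokGo (x ++ d :: rest) toks run =
        pvB_tokGo rest ((if run ++ x = [] then toks else toks ++ [run ++ x]) ++ [[d]]) [] := by
  induction x with
  | nil =>
    intro toks run
    simp only [List.nil_append, List.append_nil]
    simp only [pvB_tokGo, hd, if_true]
  | cons c x' ih =>
    intro toks run
    have hc : pvDelim c = false := hx c (by simp)
    simp only [List.cons_append, pvB_tokGo, hc, Bool.false_eq_true, if_false]
    rw [ih (fun c' hc' => hx c' (by simp [hc'])) toks (run ++ [c])]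
    simp

lemma pvTok_num (x : List Char) (h : pvNumB x = true) : pvB_tokenize x = [x] := by
  have hne : x ≠ [] := (pvNum_facts x h).2.1
  unfold pvB_tokenize
  rw [pvTokGo_clean x (pvClean_of_num x h) [] []]
  simp [hne]

lemma pvTok_range (x y : List Char) (hx : pvNumB x = true) (hy : pvNumB y = true) :
    pvB_tokenize (x ++ '-' :: y) = [x, ['-'], y] := by
  have hxne : x ≠ [] := (pvNum_facts x hx).2.1
  have hyne : y ≠ [] := (pvNum_facts y hy).2.1
  unfold pvB_tokenize
  rw [pvTokGo_delim x (pvClean_of_num x hx) '-' (by simp [pvDelim]) y,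
      pvTokGo_clean y (pvClean_of_num y hy)]
  simp [hxne, hyne]

lemma pvTok_star_slash (st : List Char) (hst : pvNumB st = true) :
    pvB_tokenize ('*' :: '/' :: st) = [['*'], ['/'], st] := by
  have hne : st ≠ [] := (pvNum_facts st hst).2.1
  unfold pvB_tokenize
  have h1 : ('*' :: '/' :: st) = ([] ++ '*' :: ([] ++ '/' :: st)) := by simp
  rw [h1, pvTokGo_delim [] (by simp) '*' (by simp [pvDelim]) ([] ++ '/' :: st),
      pvTokGo_delim [] (by simp) '/' (by simp [pvDelim]) st,
      pvTokGo_clean st (pvClean_of_num st hst)]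
  simp [hne]

lemma pvTok_base_slash (b st : List Char) (hb : pvNumB b = true) (hst : pvNumB st = true) :
    pvB_tokenize (b ++ '/' :: st) = [b, ['/'], st] := by
  have hbne : b ≠ [] := (pvNum_facts b hb).2.1
  have hstne : st ≠ [] := (pvNum_facts st hst).2.1
  unfold pvB_tokenize
  rw [pvTokGo_delim b (pvClean_of_num b hb) '/' (by simp [pvDelim]) st,
      pvTokGo_clean st (pvClean_of_num st hst)]
  simp [hbne, hstne]

lemma pvTok_range_slash (x y st : List Char) (hx : pvNumB x = true) (hy : pvNumB y = true)
    (hst : pvNumB st = true) :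
    pvB_tokenize ((x ++ '-' :: y) ++ '/' :: st) = [x, ['-'], y, ['/'], st] := by
  have hxne : x ≠ [] := (pvNum_facts x hx).2.1
  have hyne : y ≠ [] := (pvNum_facts y hy).2.1
  have hstne : st ≠ [] := (pvNum_facts st hst).2.1
  unfold pvB_tokenize
  have h1 : ((x ++ '-' :: y) ++ '/' :: st) = (x ++ '-' :: (y ++ '/' :: st)) := by simp
  rw [h1, pvTokGo_delim x (pvClean_of_num x hx) '-' (by simp [pvDelim]) (y ++ '/' :: st),
      pvTokGo_delim y (pvClean_of_num y hy) '/' (by simp [pvDelim]) st,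
      pvTokGo_clean st (pvClean_of_num st hst)]
  simp [hxne, hyne, hstne]

-- ---- the part-level equivalence ----
lemma pvPart_eq (p : List Char) (a : Int) (h : pvValidPart p = true) :
    pvA_part p a = pvB_matchTokens (pvB_tokenize p) a := by
  unfold pvValidPart at h
  by_cases hs : '/' ∈ p
  · rw [if_pos (by simp [hs])] at h
    cases hsp : PySem.Chars.splitOn p ['/'] with
    | nil => simp [hsp] at h
    | cons base rest =>
      cases rest with
      | nil => simp [hsp] at h
      | cons st rest2 =>
        cases rest2 with
        | cons _ _ => simp [hsp] at h
        | nil =>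
          rw [hsp] at h
          simp only [Bool.and_eq_true] at h
          obtain ⟨⟨hstnum, _⟩, hbase⟩ := h
          obtain ⟨hp, hslb, hsls⟩ := pvSp1_two '/' p base st (by rw [← pvSplitOn_eq_sp1, hsp])
          obtain ⟨⟨k, hk⟩, -⟩ := pvNum_facts st hstnum
          have hIsInSlash : PySem.Chars.isIn ['/'] p = true := (pvIsIn_singleton '/' p).mpr hs
          unfold pvA_part
          rw [if_neg (by simp [hIsInSlash]), if_pos hIsInSlash, hsp]
          by_cases hb : base = ['*']
          · -- */k
            subst hb
            have hB : pvB_tokenize p = [['*'], ['/'], st] := by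
              rw [hp]; exact pvTok_star_slash st hstnum
            rw [hB]
            simp [pvB_matchTokens, pvB_num, hk]
          · rw [if_neg hb] at hbase
            by_cases hbd : '-' ∈ base
            · -- lo-hi/k
              rw [if_pos (by simp [hbd])] at hbase
              cases hbsp : PySem.Chars.splitOn base ['-'] with
              | nil => simp [hbsp] at hbase
              | cons lo rest3 =>
                cases rest3 with
                | nil => simp [hbsp] at hbase
                | cons hi rest4 =>
                  cases rest4 with
                  | cons _ _ => simp [hbsp] at hbase
                  | nil =>
                    rw [hbsp] at hbase
                    simp only [Bool.and_eq_true] at hbase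
                    obtain ⟨hlonum, hhinum⟩ := hbase
                    obtain ⟨hbe, -, -⟩ := pvSp1_two '-' base lo hi (by rw [← pvSplitOn_eq_sp1, hbsp])
                    obtain ⟨⟨l, hl⟩, -⟩ := pvNum_facts lo hlonum
                    obtain ⟨⟨hh, hhi⟩, -⟩ := pvNum_facts hi hhinum
                    have hB : pvB_tokenize p = [lo, ['-'], hi, ['/'], st] := by
                      rw [hp, hbe]; exact pvTok_range_slash lo hi st hlonum hhinum hstnum
                    rw [hB]
                    have hIsInDash : PySem.Chars.isIn ['-'] base = true := (pvIsIn_singleton '-' base).mpr hbd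
                    simp [hk, hb, hIsInDash, hbsp, hl, hhi, pvB_matchTokens, pvB_num]
            · -- lo/k
              rw [if_neg (by simp [hbd])] at hbase
              obtain ⟨⟨bv, hbv⟩, -⟩ := pvNum_facts base hbase
              have hB : pvB_tokenize p = [base, ['/'], st] := by
                rw [hp]; exact pvTok_base_slash base st hbase hstnum
              rw [hB]
              have hIsInDash : PySem.Chars.isIn ['-'] base = false :=
                pvIsIn_singleton_false '-' base hbd
              simp [hk, hb, hIsInDash, hbv, pvB_matchTokens, pvB_num]
  · rw [if_neg (by simp [hs])] at h
    have hIsInSlash : PySem.Chars.isIn ['/'] p = false := pvIsIn_singleton_false '/' p hs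
    by_cases hd : '-' ∈ p
    · -- lo-hi
      rw [if_pos (by simp [hd])] at h
      cases hsp : PySem.Chars.splitOn p ['-'] with
      | nil => simp [hsp] at h
      | cons lo rest =>
        cases rest with
        | nil => simp [hsp] at h
        | cons hi rest2 =>
          cases rest2 with
          | cons _ _ => simp [hsp] at h
          | nil =>
            rw [hsp] at h
            simp only [Bool.and_eq_true] at h
            obtain ⟨hlonum, hhinum⟩ := h
            obtain ⟨hpe, -, -⟩ := pvSp1_two '-' p lo hi (by rw [← pvSplitOn_eq_sp1, hsp])
            obtain ⟨⟨l, hl⟩, -⟩ := pvNum_facts lo hlonum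
            obtain ⟨⟨hh, hhi⟩, -⟩ := pvNum_facts hi hhinum
            have hIsInDash : PySem.Chars.isIn ['-'] p = true := (pvIsIn_singleton '-' p).mpr hd
            have hB : pvB_tokenize p = [lo, ['-'], hi] := by
              rw [hpe]; exact pvTok_range lo hi hlonum hhinum
            unfold pvA_part
            rw [if_pos (by simp [hIsInDash, hIsInSlash]), hsp, hB]
            simp [hl, hhi, pvB_matchTokens, pvB_num]
    · -- exact value
      rw [if_neg (by simp [hd])] at h
      obtain ⟨⟨n, hn⟩, -⟩ := pvNum_facts p h
      have hIsInDash : PySem.Chars.isIn ['-'] p = false := pvIsIn_singleton_false '-' p hd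
      have hB : pvB_tokenize p = [p] := pvTok_num p h
      unfold pvA_part
      rw [if_neg (by simp [hIsInDash]), if_neg (by simp [hIsInSlash]), hB]
      simp [hn, pvB_matchTokens, pvB_num]

-- ===== VERDICT (by name: the statement is the Claim_ definition above) =====
theorem matches_field_py_spec : Claim_equal_matches_field_py := by
  intro fv a mn mx _ hpre
  unfold Spec_matches_field_py matches_field_py matches_field_py_alt
  by_cases hstar : fv = "*"
  · simp [hstar]
  · simp only [hstar, if_false]
    rcases hpre with h | h
    · exact absurd h hstar
    · exact PySem.List.any_congr_mem (fun p hp => pvPart_eq _ a (h p hp))
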